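-- pv_equiv track=rewrite | github.com/rp2knight/rp2knight.github.io | riddlers/code/mackerels.py | MackerelMatch
-- ===== SOURCE A (Python) =====
-- def ToChars(str):
--     return list(str)
--
-- def MackerelMatch(state, word):
--     ret = True
--     lets = ToChars(state.lower())
--     letw = ToChars(word.lower())
--     for i in range(len(lets)):
--         for j in range(len(letw)):
--             if lets[i] == letw[j]:
--                 ret = False
--     return(ret)
-- ===== SOURCE B (Python) =====
-- def MackerelMatch(state, word):
--     seen = set(state.lower())
--     for c in word.lower():
--         if c in seen:
--             return False
--     return True
-- ===== Notes on version B (the rewrite author's own statement) =====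
-- stated objective: faster
-- what changed: Replaces A's exhaustive double scan over all (state letter, word letter) pairs with a letter set built once from state and a single early-exit pass over word.
import Mathlib
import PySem

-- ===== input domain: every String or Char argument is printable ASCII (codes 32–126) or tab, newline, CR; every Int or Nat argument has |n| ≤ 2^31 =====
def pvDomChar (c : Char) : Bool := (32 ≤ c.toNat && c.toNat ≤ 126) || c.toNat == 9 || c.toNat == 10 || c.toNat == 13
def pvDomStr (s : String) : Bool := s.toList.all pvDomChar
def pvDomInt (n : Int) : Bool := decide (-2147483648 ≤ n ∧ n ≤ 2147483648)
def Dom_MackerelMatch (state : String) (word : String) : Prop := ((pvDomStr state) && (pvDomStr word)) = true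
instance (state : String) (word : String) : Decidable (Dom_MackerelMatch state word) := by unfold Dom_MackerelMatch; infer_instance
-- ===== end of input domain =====

-- ===== PORT A =====
-- B builds the letter set from state once and scans word once with early exit (faster than A's pairwise double scan).
def ToChars (s : String) : List Char := s.toList

def MackerelMatch (state : String) (word : String) : Bool :=
  let lets := ToChars (PySem.Str.lower state)
  let letw := ToChars (PySem.Str.lower word)
  (PySem.List.pyRange 0 lets.length 1).foldl (fun ret i =>
    (PySem.List.pyRange 0 letw.length 1).foldl (fun ret j =>
      if PySem.List.pyGetD lets i ' ' == PySem.List.pyGetD letw j ' ' then false else ret) ret) true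

-- ===== PORT B =====
def mmScan (seen : PySem.Set Char) : List Char → Bool
  | [] => true
  | c :: cs => if PySem.Set.contains seen c then false else mmScan seen cs

def MackerelMatch_alt (state : String) (word : String) : Bool :=
  let seen : PySem.Set Char := PySem.Set.ofList (PySem.Str.lower state).toList
  mmScan seen (PySem.Str.lower word).toList

-- ===== PRECONDITION & SPEC =====
def Spec_MackerelMatch (state : String) (word : String) (out : Bool) : Prop := out = MackerelMatch_alt state word
instance (state : String) (word : String) (out : Bool) : Decidable (Spec_MackerelMatch state word out) := by unfold Spec_MackerelMatch; infer_instance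

-- ===== CLAIM (what is proved, stated in full; the proofs are below) =====
def Claim_equal_MackerelMatch : Prop := ∀ (state : String) (word : String), Dom_MackerelMatch state word → Spec_MackerelMatch state word (MackerelMatch state word)

-- ===== LEMMAS AND PROOFS =====

theorem mm_inner (a : Char) (letw : List Char) (r : Bool) :
    letw.foldl (fun ret c => if a == c then false else ret) r
      = (r && !letw.any (fun c => a == c)) := by
  induction letw generalizing r with
  | nil => simp
  | cons c cs ih =>
    simp only [List.foldl_cons, List.any_cons, ih]
    by_cases h : a == c <;> cases r <;> simp [h]

theorem mm_inner_range (ys : List Char) (a : Char) (r : Bool) :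
    (PySem.List.pyRange 0 ys.length 1).foldl
        (fun ret j => if a == PySem.List.pyGetD ys j ' ' then false else ret) r
      = (r && !ys.any (fun c => a == c)) := by
  rw [PySem.List.foldl_pyRange_zero_pyGetD' ys ' ' (fun acc c => if a == c then false else acc) r]
  exact mm_inner a ys r

theorem mm_outer (lets letw : List Char) (r : Bool) :
    lets.foldl (fun ret a => ret && !letw.any (fun c => a == c)) r
      = (r && !lets.any (fun a => letw.any (fun c => a == c))) := by
  induction lets generalizing r with
  | nil => simp
  | cons a as ih =>
    rw [List.foldl_cons, ih, List.any_cons]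
    cases r <;> cases h : letw.any (fun c => a == c) <;> simp [h]

theorem mm_scan (seen : PySem.Set Char) (cs : List Char) :
    mmScan seen cs = !cs.any (fun c => PySem.Set.contains seen c) := by
  induction cs with
  | nil => rfl
  | cons c cs ih =>
    simp only [mmScan, List.any_cons, ih]
    by_cases h : PySem.Set.contains seen c <;> simp [h]

-- ===== VERDICT (by name: the statement is the Claim_ definition above) =====
theorem MackerelMatch_spec : Claim_equal_MackerelMatch := by
  intro state word _
  unfold Spec_MackerelMatch MackerelMatch MackerelMatch_alt ToChars
  rw [mm_scan]
  dsimp only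
  rw [PySem.List.foldl_pyRange_zero_pyGetD' (PySem.Str.lower state).toList ' '
      (fun acc a => (PySem.List.pyRange 0 (PySem.Str.lower word).toList.length 1).foldl
        (fun ret j => if a == PySem.List.pyGetD (PySem.Str.lower word).toList j ' ' then false else ret) acc) true]
  simp only [mm_inner_range]
  rw [mm_outer]
  simp only [Bool.true_and]
  congr 1
  rw [Bool.eq_iff_iff]
  simp only [List.any_eq_true, PySem.Set.contains_iff, PySem.Set.mem_ofList]
  constructor
  · rintro ⟨a, ha, c, hc, h⟩
    exact ⟨c, hc, (beq_iff_eq.mp h) ▸ ha⟩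
  · rintro ⟨c, hc, hm⟩
    exact ⟨c, hm, c, hc, by simp⟩
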